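-- pv_equiv track=rewrite | github.com/genesis1tech/tsmedia-vengo | src/tsv6/hardware/barcode_reader.py | is_qr_code
-- ===== SOURCE A (Python) =====
-- def is_qr_code(barcode_data):
--     """
--     Detect if scanned data is a QR code
--
--     QR codes typically contain:
--     - Text characters (letters)
--     - HTTP/HTTPS URLs
--     - Forward slashes (/)
--
--     Barcodes in this system are always numeric
--
--     Args:
--         barcode_data: The scanned data string
--
--     Returns:
--         bool: True if likely a QR code, False if likely a barcode
--     """
--     if not barcode_data or not barcode_data.strip():
--         return False
--
--     barcode_data = barcode_data.strip()
--
--     # If contains any letters (a-z, A-Z), it's likely a QR code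
--     if any(c.isalpha() for c in barcode_data):
--         return True
--
--     # If contains common URL patterns, it's definitely a QR code
--     if 'http' in barcode_data.lower() or 'www.' in barcode_data.lower():
--         return True
--
--     # If contains forward slash, it's likely a QR code (URLs, paths)
--     if '/' in barcode_data:
--         return True
--
--     # If contains other special characters commonly in QR codes
--     special_chars = ['?', '=', '&', ':', '@', '#', '%', '+', '_']
--     if any(char in barcode_data for char in special_chars):
--         return True
--
--     # Check if it's numeric (allowing dashes which are common in barcodes)
--     # Remove dashes and check if remaining is all digits
--     numeric_without_dashes = barcode_data.replace('-', '')
--     if numeric_without_dashes.isdigit() and not any(c.isalpha() for c in barcode_data):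
--         return False
--
--     # Default to treating as QR code if unsure
--     return True
-- ===== SOURCE B (Python) =====
-- def is_qr_code(barcode_data):
--     # Simpler: the whole branch cascade reduces to one predicate -- it is a
--     # barcode exactly when the stripped data is digits-and-dashes only.
--     if not barcode_data or not barcode_data.strip():
--         return False
--     return not barcode_data.strip().replace('-', '').isdigit()
-- ===== Notes on version B (the rewrite author's own statement) =====
-- stated objective: simpler
-- what changed: Replaces A's five-branch cascade of letter/URL/slash/special-character scans with a single predicate: after the emptiness guard, return the negation of the digits-only test on the stripped input with dashes removed, since A returns False exactly on such digits-and-dashes inputs.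
import Mathlib
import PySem

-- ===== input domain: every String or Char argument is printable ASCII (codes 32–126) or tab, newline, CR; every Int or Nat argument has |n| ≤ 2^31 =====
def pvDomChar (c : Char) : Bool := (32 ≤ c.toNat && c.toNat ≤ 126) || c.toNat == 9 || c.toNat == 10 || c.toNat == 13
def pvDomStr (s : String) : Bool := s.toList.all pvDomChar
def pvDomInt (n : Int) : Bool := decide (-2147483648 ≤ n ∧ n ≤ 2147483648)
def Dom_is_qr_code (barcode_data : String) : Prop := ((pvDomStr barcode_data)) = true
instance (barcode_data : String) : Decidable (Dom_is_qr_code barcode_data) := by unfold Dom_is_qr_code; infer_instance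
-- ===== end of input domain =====

-- B replaces A's five-branch cascade by a single digits-and-dashes predicate (objective: simpler).

-- ===== PORT A =====
def is_qr_code (barcode_data : String) : Bool :=
  if barcode_data.toList.isEmpty || (PySem.Str.strip barcode_data).toList.isEmpty then false
  else
    let b := (PySem.Str.strip barcode_data).toList
    if b.any PySem.Chars.isalpha then true
    else if PySem.Chars.isIn "http".toList (PySem.Chars.lower b) ||
            PySem.Chars.isIn "www.".toList (PySem.Chars.lower b) then true
    else if PySem.Chars.isIn ['/'] b then true
    else if ['?', '=', '&', ':', '@', '#', '%', '+', '_'].any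
              (fun ch => PySem.Chars.isIn [ch] b) then true
    else
      let numeric_without_dashes := PySem.Chars.replace b ['-'] []
      if PySem.Chars.strIsdigit numeric_without_dashes && !(b.any PySem.Chars.isalpha) then false
      else true

-- ===== PORT B =====
def is_qr_code_alt (barcode_data : String) : Bool :=
  let b := (PySem.Str.strip barcode_data).toList
  if barcode_data.toList.isEmpty || b.isEmpty then false
  else !PySem.Chars.strIsdigit (PySem.Chars.replace b ['-'] [])

-- ===== PRECONDITION & SPEC =====
def Spec_is_qr_code (barcode_data : String) (out : Bool) : Prop := out = is_qr_code_alt barcode_data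
instance (barcode_data : String) (out : Bool) : Decidable (Spec_is_qr_code barcode_data out) := by unfold Spec_is_qr_code; infer_instance

-- ===== CLAIM (what is proved, stated in full; the proofs are below) =====
def Claim_equal_is_qr_code : Prop := ∀ (barcode_data : String), Dom_is_qr_code barcode_data → Spec_is_qr_code barcode_data (is_qr_code barcode_data)

-- ===== LEMMAS AND PROOFS =====

-- replace(b, '-', '') removes exactly the dashes
lemma replace_go_dash (l : List Char) : ∀ (fuel : Nat) (acc : List Char), l.length ≤ fuel →
    PySem.Chars.replace.go ['-'] [] fuel l acc = acc.reverse ++ l.filter (fun c => !(c == '-')) := by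
  induction l with
  | nil =>
    intro fuel acc _
    cases fuel <;> simp [PySem.Chars.replace.go]
  | cons c t ih =>
    intro fuel acc hf
    cases fuel with
    | zero => simp at hf
    | succ f =>
      rw [PySem.Chars.replace.go]
      by_cases hc : c = '-'
      · subst hc
        have hp : List.isPrefixOf ['-'] ('-' :: t) = true := by simp [List.isPrefixOf]
        simp only [hp, if_true, List.length_nil, List.drop_succ_cons, List.drop_zero,
          List.reverse_nil, List.nil_append, List.length_cons] at *
        rw [ih f acc (by omega)]
        simp
      · have hp : List.isPrefixOf ['-'] (c :: t) = false := by
          simp [List.isPrefixOf]; exact fun h => hc h.symm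
        simp only [hp, Bool.false_eq_true, if_false]
        rw [ih f (c :: acc) (by simp at hf; omega)]
        simp [hc]

lemma replace_dash (b : List Char) :
    PySem.Chars.replace b ['-'] [] = b.filter (fun c => !(c == '-')) := by
  simp only [PySem.Chars.replace, List.isEmpty_cons, Bool.false_eq_true, if_false]
  exact replace_go_dash b b.length [] le_rfl

lemma all_digit_or_dash (b : List Char)
    (hd : PySem.Chars.strIsdigit (b.filter (fun c => !(c == '-'))) = true) :
    ∀ c ∈ b, PySem.Chars.isdigit c = true ∨ c = '-' := by
  intro c hc
  by_cases h : c = '-'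
  · exact Or.inr h
  · refine Or.inl ?_
    simp only [PySem.Chars.strIsdigit, Bool.and_eq_true, List.all_eq_true] at hd
    exact hd.2 c (List.mem_filter.mpr ⟨hc, by simp [h]⟩)

lemma digit_not_alpha (c : Char) (h : PySem.Chars.isdigit c = true) :
    PySem.Chars.isalpha c = false := by
  simp only [PySem.Chars.isdigit, PySem.Chars.isalpha, PySem.Chars.isupper, PySem.Chars.islower,
    Bool.and_eq_true, decide_eq_true_eq, Bool.or_eq_false_iff, Bool.and_eq_false_iff,
    decide_eq_false_iff_not, not_le, Char.le_def, UInt32.le_iff_toNat_le] at *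
  have h0 : '0'.val.toNat = 48 := rfl
  have h9 : '9'.val.toNat = 57 := rfl
  have hA : 'A'.val.toNat = 65 := rfl
  have hZ : 'Z'.val.toNat = 90 := rfl
  have ha : 'a'.val.toNat = 97 := rfl
  have hz : 'z'.val.toNat = 122 := rfl
  omega

lemma any_alpha_false (b : List Char)
    (hall : ∀ c ∈ b, PySem.Chars.isdigit c = true ∨ c = '-') :
    b.any PySem.Chars.isalpha = false := by
  simp only [List.any_eq_false]
  intro c hc
  rcases hall c hc with h | rfl
  · simp [digit_not_alpha c h]
  · decide

lemma not_mem_of_all (b : List Char)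
    (hall : ∀ c ∈ b, PySem.Chars.isdigit c = true ∨ c = '-')
    (ch : Char) (h1 : PySem.Chars.isdigit ch = false) (h2 : ch ≠ '-') : ch ∉ b := by
  intro hm
  rcases hall ch hm with h | h
  · rw [h1] at h; exact Bool.false_ne_true h
  · exact h2 h

lemma isIn_single_false (b : List Char)
    (hall : ∀ c ∈ b, PySem.Chars.isdigit c = true ∨ c = '-')
    (ch : Char) (h1 : PySem.Chars.isdigit ch = false) (h2 : ch ≠ '-') :
    PySem.Chars.isIn [ch] b = false := by
  rw [PySem.Chars.isIn_eq_false_iff, List.singleton_infix_iff]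
  exact not_mem_of_all b hall ch h1 h2

lemma lowerChar_self (c : Char)
    (h : PySem.Chars.isdigit c = true ∨ c = '-') : PySem.Chars.lowerChar c = c := by
  have hu : PySem.Chars.isupper c = false := by
    rcases h with h | rfl
    · simp only [PySem.Chars.isdigit, PySem.Chars.isupper, Bool.and_eq_true, decide_eq_true_eq,
        Bool.and_eq_false_iff, decide_eq_false_iff_not, not_le, Char.le_def,
        UInt32.le_iff_toNat_le] at *
      have h0 : '0'.val.toNat = 48 := rfl
      have h9 : '9'.val.toNat = 57 := rfl
      have hA : 'A'.val.toNat = 65 := rfl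
      have hZ : 'Z'.val.toNat = 90 := rfl
      omega
    · decide
  simp [PySem.Chars.lowerChar, hu]

lemma isIn_lower_false (b : List Char)
    (hall : ∀ c ∈ b, PySem.Chars.isdigit c = true ∨ c = '-')
    (sub : List Char) (ch : Char) (hch : ch ∈ sub)
    (h1 : PySem.Chars.isdigit ch = false) (h2 : ch ≠ '-') :
    PySem.Chars.isIn sub (PySem.Chars.lower b) = false := by
  rw [PySem.Chars.isIn_eq_false_iff]
  intro hinf
  have hm : ch ∈ PySem.Chars.lower b := hinf.subset hch
  simp only [PySem.Chars.lower, List.mem_map] at hm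
  obtain ⟨c, hc, hlc⟩ := hm
  have := lowerChar_self c (hall c hc)
  rw [this] at hlc
  subst hlc
  exact not_mem_of_all b hall c h1 h2 hc

-- ===== VERDICT (by name: the statement is the Claim_ definition above) =====
theorem is_qr_code_spec : Claim_equal_is_qr_code := by
  intro s _
  unfold Spec_is_qr_code
  simp only [is_qr_code, is_qr_code_alt]
  cases hge : (s.toList.isEmpty || (PySem.Str.strip s).toList.isEmpty) with
  | true => simp only [if_true]
  | false =>
    simp only [Bool.false_eq_true, if_false]
    cases hd : PySem.Chars.strIsdigit (PySem.Chars.replace (PySem.Str.strip s).toList ['-'] []) with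
    | false =>
      simp only [Bool.false_and, Bool.not_false, Bool.false_eq_true, if_false]
      split_ifs <;> rfl
    | true =>
      rw [replace_dash] at hd
      have hall := all_digit_or_dash _ hd
      have h1 := any_alpha_false _ hall
      have hhttp := isIn_lower_false _ hall "http".toList 'h' (by decide) (by decide) (by decide)
      have hwww := isIn_lower_false _ hall "www.".toList 'w' (by decide) (by decide) (by decide)
      have hslash := isIn_single_false _ hall '/' (by decide) (by decide)
      have hspec : (['?', '=', '&', ':', '@', '#', '%', '+', '_']).any
          (fun ch => PySem.Chars.isIn [ch] (PySem.Str.strip s).toList) = false := by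
        simp only [List.any_eq_false]
        intro ch hch
        fin_cases hch <;> simp only [Bool.not_eq_true] <;>
          (refine isIn_single_false _ hall _ ?_ ?_ <;> decide)
      simp only [h1, hhttp, hwww, hslash, hspec, Bool.false_eq_true, Bool.or_self, if_false,
        Bool.true_and, Bool.not_false, Bool.not_true, if_true]
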